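-- pv_equiv track=rewrite | github.com/yzkee/Archon | python/src/server/services/llm_provider_service.py | is_valid_embedding_model_for_provider
-- ===== SOURCE A (Python) =====
-- def is_openai_embedding_model(model: str) -> bool:
--     """Check if a model is an OpenAI embedding model."""
--     if not model:
--         return False
--
--     model_lower = model.strip().lower()
--
--     # Known OpenAI embeddings
--     base_models = {
--         "text-embedding-ada-002",
--         "text-embedding-3-small",
--         "text-embedding-3-large",
--     }
--
--     if model_lower in base_models:
--         return True
--
--     # Strip common vendor prefixes like "openai/" or "openrouter/"
--     for separator in ("/", ":"):
--         if separator in model_lower: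
--             candidate = model_lower.split(separator)[-1]
--             if candidate in base_models:
--                 return True
--
--     # Fallback substring detection for custom naming conventions
--     return any(base in model_lower for base in base_models)
--
-- def is_google_embedding_model(model: str) -> bool:
--     """Check if a model is a Google embedding model."""
--     if not model:
--         return False
--
--     model_lower = model.lower()
--     google_patterns = [
--         "text-embedding-004",
--         "text-embedding-005",
--         "text-multilingual-embedding-002",
--         "gemini-embedding-001",
--         "multimodalembedding@001"
--     ]
--
--     return any(pattern in model_lower for pattern in google_patterns)
--
-- def is_valid_embedding_model_for_provider(model: str, provider: str) -> bool:
--     """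
--     Validate if an embedding model is compatible with a provider.
--
--     Args:
--         model: The embedding model name
--         provider: The provider name
--
--     Returns:
--         bool: True if the model is compatible with the provider
--     """
--     if not model or not provider:
--         return False
--
--     provider_lower = provider.lower()
--
--     if provider_lower == "openai":
--         return is_openai_embedding_model(model)
--     elif provider_lower == "google":
--         return is_google_embedding_model(model)
--     elif provider_lower in ["openrouter", "anthropic", "grok"]:
--         # These providers support both OpenAI and Google models
--         return is_openai_embedding_model(model) or is_google_embedding_model(model)
--     elif provider_lower == "ollama":
--         # Ollama has its own models, check common ones
--         model_lower = model.lower()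
--         ollama_patterns = ["nomic-embed", "all-minilm", "mxbai-embed", "embed"]
--         return any(pattern in model_lower for pattern in ollama_patterns)
--     else:
--         # For unknown providers, assume OpenAI compatibility
--         return is_openai_embedding_model(model)
-- ===== SOURCE B (Python) =====
-- _OPENAI = ["text-embedding-ada-002", "text-embedding-3-small", "text-embedding-3-large"]
-- _GOOGLE = [
--     "text-embedding-004",
--     "text-embedding-005",
--     "text-multilingual-embedding-002",
--     "gemini-embedding-001",
--     "multimodalembedding@001",
-- ]
-- _OLLAMA = ["nomic-embed", "all-minilm", "mxbai-embed", "embed"]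
-- _PROVIDER_PATTERNS = {
--     "openai": _OPENAI,
--     "google": _GOOGLE,
--     "openrouter": _OPENAI + _GOOGLE,
--     "anthropic": _OPENAI + _GOOGLE,
--     "grok": _OPENAI + _GOOGLE,
--     "ollama": _OLLAMA,
-- }
--
--
-- def is_valid_embedding_model_for_provider(model: str, provider: str) -> bool:
--     if not model or not provider:
--         return False
--     model_lower = model.lower()
--     patterns = _PROVIDER_PATTERNS.get(provider.lower(), _OPENAI)
--     return any(pattern in model_lower for pattern in patterns)
-- ===== Notes on version B (the rewrite author's own statement) =====
-- stated objective: simpler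
-- what changed: Replaced A's per-provider helper functions with their exact-match and vendor-prefix-split stages by one provider-to-patterns table and a single substring `any` pass over the lowercased model (the exact-match and split stages are subsumed by the substring test, and strip never affects substring containment).
import Mathlib
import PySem

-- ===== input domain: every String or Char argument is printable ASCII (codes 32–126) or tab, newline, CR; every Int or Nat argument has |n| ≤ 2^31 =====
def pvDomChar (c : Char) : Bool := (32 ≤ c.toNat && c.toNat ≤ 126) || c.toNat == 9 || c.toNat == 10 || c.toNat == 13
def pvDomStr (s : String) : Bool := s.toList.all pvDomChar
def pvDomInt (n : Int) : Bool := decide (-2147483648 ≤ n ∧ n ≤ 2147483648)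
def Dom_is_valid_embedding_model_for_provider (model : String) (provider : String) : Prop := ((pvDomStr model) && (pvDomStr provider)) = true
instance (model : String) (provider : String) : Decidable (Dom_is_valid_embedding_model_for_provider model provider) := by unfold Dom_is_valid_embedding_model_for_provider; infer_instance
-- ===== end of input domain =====

set_option maxRecDepth 8000
set_option maxHeartbeats 2000000


-- B replaces A's helper functions and their exact-match/prefix-split stages by one provider→patterns
-- table and a single substring `any` pass (objective: simpler).

-- ===== PORT A =====
def pyOpenAIBases : PySem.Set String :=
  PySem.Set.ofList ["text-embedding-ada-002", "text-embedding-3-small", "text-embedding-3-large"]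

-- body of A's `for separator in ("/", ":")` loop (returns True iff the candidate check fires)
def pySepCandidateHit (model_lower : String) (separator : String) : Bool :=
  if PySem.Str.isIn separator model_lower then
    match PySem.Str.split? model_lower separator with
    | some parts =>
      match PySem.List.pyGet? parts (-1) with
      | some candidate => PySem.Set.contains pyOpenAIBases candidate
      | none => false
    | none => false
  else false

def is_openai_embedding_model (model : String) : Bool :=
  if model == "" then false
  else
    let model_lower := PySem.Str.lower (PySem.Str.strip model)
    if PySem.Set.contains pyOpenAIBases model_lower then true
    else if (["/", ":"] : List String).any (pySepCandidateHit model_lower) then true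
    else pyOpenAIBases.any (fun base => PySem.Str.isIn base model_lower)

def pyGooglePatterns : List String :=
  ["text-embedding-004", "text-embedding-005", "text-multilingual-embedding-002",
   "gemini-embedding-001", "multimodalembedding@001"]

def is_google_embedding_model (model : String) : Bool :=
  if model == "" then false
  else
    let model_lower := PySem.Str.lower model
    pyGooglePatterns.any (fun pattern => PySem.Str.isIn pattern model_lower)

def is_valid_embedding_model_for_provider (model : String) (provider : String) : Bool :=
  if model == "" || provider == "" then false
  else
    let provider_lower := PySem.Str.lower provider
    if provider_lower == "openai" then is_openai_embedding_model model
    else if provider_lower == "google" then is_google_embedding_model model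
    else if (["openrouter", "anthropic", "grok"] : List String).contains provider_lower then
      is_openai_embedding_model model || is_google_embedding_model model
    else if provider_lower == "ollama" then
      let model_lower := PySem.Str.lower model
      (["nomic-embed", "all-minilm", "mxbai-embed", "embed"] : List String).any
        (fun pattern => PySem.Str.isIn pattern model_lower)
    else is_openai_embedding_model model

-- ===== PORT B =====
def altOpenai : List String :=
  ["text-embedding-ada-002", "text-embedding-3-small", "text-embedding-3-large"]

def altGoogle : List String :=
  ["text-embedding-004", "text-embedding-005", "text-multilingual-embedding-002",
   "gemini-embedding-001", "multimodalembedding@001"]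

def altOllama : List String := ["nomic-embed", "all-minilm", "mxbai-embed", "embed"]

def altProviderPatterns : PySem.Dict String (List String) :=
  PySem.Dict.ofList
    [("openai", altOpenai), ("google", altGoogle), ("openrouter", altOpenai ++ altGoogle),
     ("anthropic", altOpenai ++ altGoogle), ("grok", altOpenai ++ altGoogle),
     ("ollama", altOllama)]

def is_valid_embedding_model_for_provider_alt (model : String) (provider : String) : Bool :=
  if model == "" || provider == "" then false
  else
    let model_lower := PySem.Str.lower model
    let patterns := PySem.Dict.getD altProviderPatterns (PySem.Str.lower provider) altOpenai
    patterns.any (fun pattern => PySem.Str.isIn pattern model_lower)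

-- ===== PRECONDITION & SPEC =====
def Spec_is_valid_embedding_model_for_provider (model : String) (provider : String) (out : Bool) : Prop := out = is_valid_embedding_model_for_provider_alt model provider
instance (model : String) (provider : String) (out : Bool) : Decidable (Spec_is_valid_embedding_model_for_provider model provider out) := by unfold Spec_is_valid_embedding_model_for_provider; infer_instance

-- ===== CLAIM (what is proved, stated in full; the proofs are below) =====
def Claim_equal_is_valid_embedding_model_for_provider : Prop := ∀ (model : String) (provider : String), Dom_is_valid_embedding_model_for_provider model provider → Spec_is_valid_embedding_model_for_provider model provider (is_valid_embedding_model_for_provider model provider)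

-- ===== LEMMAS AND PROOFS =====

theorem isspace_of_range (c : Char) (h1 : 33 ≤ c.toNat) (h2 : c.toNat ≤ 126) :
    PySem.Chars.isspace c = false := by
  simp only [PySem.Chars.isspace, Bool.or_eq_false_iff, Bool.and_eq_false_iff,
    decide_eq_false_iff_not]
  omega

theorem isspace_lowerChar (c : Char) :
    PySem.Chars.isspace (PySem.Chars.lowerChar c) = PySem.Chars.isspace c := by
  unfold PySem.Chars.lowerChar
  split
  · rename_i h
    simp only [PySem.Chars.isupper, Bool.and_eq_true, decide_eq_true_eq] at h
    obtain ⟨h1, h2⟩ := h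
    rw [Char.le_def] at h1 h2
    have h1 : 65 ≤ c.toNat := h1
    have h2 : c.toNat ≤ 90 := h2
    have hv : (c.toNat + 32).isValidChar := Or.inl (by omega)
    have ht : (Char.ofNat (c.toNat + 32)).toNat = c.toNat + 32 := by rw [Char.toNat_ofNat, if_pos hv]
    rw [isspace_of_range _ (by omega) (by omega), isspace_of_range c (by omega) (by omega)]
  · rfl

theorem lower_strip_comm (l : List Char) :
    PySem.Chars.lower (PySem.Chars.strip l) = PySem.Chars.strip (PySem.Chars.lower l) := by
  have hfun : (PySem.Chars.isspace ∘ PySem.Chars.lowerChar) = PySem.Chars.isspace :=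
    funext isspace_lowerChar
  unfold PySem.Chars.strip PySem.Chars.rstrip PySem.Chars.lstrip PySem.Chars.lower
  simp [List.dropWhile_map, hfun, ← List.map_reverse]

theorem strip_infix (l : List Char) : PySem.Chars.strip l <:+: l := by
  unfold PySem.Chars.strip PySem.Chars.rstrip PySem.Chars.lstrip
  have hpre : ∀ x : List Char,
      (List.dropWhile PySem.Chars.isspace x.reverse).reverse <+: x := by
    intro x
    have h : ((List.dropWhile PySem.Chars.isspace x.reverse).reverse).reverse <:+ x.reverse := by
      rw [List.reverse_reverse]
      exact List.dropWhile_suffix _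
    exact List.reverse_suffix.mp h
  exact (hpre (List.dropWhile PySem.Chars.isspace l)).isInfix.trans
    (List.dropWhile_suffix _).isInfix

theorem infix_dropWhile_iff (b l : List Char) (hne : b ≠ [])
    (hb : ∀ c ∈ b, PySem.Chars.isspace c = false) :
    b <:+: List.dropWhile PySem.Chars.isspace l ↔ b <:+: l := by
  constructor
  · exact fun h => h.trans (List.dropWhile_suffix _).isInfix
  · intro h
    induction l with
    | nil => simpa using h
    | cons c t ih =>
      rw [List.dropWhile_cons]
      by_cases hc : PySem.Chars.isspace c = true
      · rw [if_pos hc]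
        rcases List.infix_cons_iff.mp h with hpre | hinf
        · obtain ⟨c0, b', rfl⟩ := List.exists_cons_of_ne_nil hne
          have := (List.cons_prefix_cons.mp hpre).1
          have hns := hb c0 List.mem_cons_self
          rw [this] at hns
          rw [hns] at hc
          exact absurd hc (by simp)
        · exact ih hinf
      · rw [if_neg hc]
        exact h

theorem infix_reverse' (b l : List Char) : b <:+: l.reverse ↔ b.reverse <:+: l := by
  conv_lhs => rw [← List.reverse_reverse b]
  exact List.reverse_infix

theorem infix_strip_iff (b l : List Char) (hne : b ≠ [])
    (hb : ∀ c ∈ b, PySem.Chars.isspace c = false) :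
    b <:+: PySem.Chars.strip l ↔ b <:+: l := by
  have hne' : b.reverse ≠ [] := by simpa using hne
  have hb' : ∀ c ∈ b.reverse, PySem.Chars.isspace c = false := fun c hc =>
    hb c (List.mem_reverse.mp hc)
  unfold PySem.Chars.strip PySem.Chars.rstrip PySem.Chars.lstrip
  rw [infix_reverse', infix_dropWhile_iff _ _ hne' hb', ← infix_reverse',
    List.reverse_reverse, infix_dropWhile_iff _ _ hne hb]

theorem splitOn_go_mem (sep : List Char) :
    ∀ (fuel : ℕ) (l cur : List Char) (acc : List (List Char)) (x : List Char),
      x ∈ PySem.Chars.splitOn.go sep fuel l cur acc → x ∈ acc ∨ x <:+: (cur.reverse ++ l) := by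
  intro fuel
  induction fuel with
  | zero =>
    intro l cur acc x hx
    rw [PySem.Chars.splitOn.go] at hx
    simp only [List.mem_reverse, List.mem_cons] at hx
    rcases hx with h | h
    · exact Or.inr (h ▸ List.infix_refl _)
    · exact Or.inl h
  | succ fuel ih =>
    intro l cur acc x hx
    cases l with
    | nil =>
      rw [PySem.Chars.splitOn.go] at hx
      case x_5 => omega
      simp only [List.mem_reverse, List.mem_cons] at hx
      rcases hx with h | h
      · subst h
        exact Or.inr ⟨[], [], by simp⟩
      · exact Or.inl h
    | cons c rest =>
      rw [PySem.Chars.splitOn.go] at hx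
      by_cases hp : sep.isPrefixOf (c :: rest) = true
      · rw [if_pos hp] at hx
        rcases ih _ _ _ _ hx with h | h
        · rcases List.mem_cons.mp h with h | h
          · subst h
            exact Or.inr ⟨[], c :: rest, by simp⟩
          · exact Or.inl h
        · refine Or.inr (h.trans ?_)
          simp only [List.reverse_nil, List.nil_append]
          exact ((List.drop_suffix _ _).trans (List.suffix_append _ _)).isInfix
      · rw [if_neg hp] at hx
        rcases ih _ _ _ _ hx with h | h
        · exact Or.inl h
        · refine Or.inr ?_
          simpa [List.append_assoc] using h

theorem mem_splitOn_infix (s sep x : List Char) (hx : x ∈ PySem.Chars.splitOn s sep) :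
    x <:+: s := by
  unfold PySem.Chars.splitOn at hx
  rcases splitOn_go_mem sep _ _ _ _ _ hx with h | h
  · simp at h
  · simpa using h

theorem pyGet?_mem {α : Type} (l : List α) (i : Int) (x : α)
    (h : PySem.List.pyGet? l i = some x) : x ∈ l := by
  unfold PySem.List.pyGet? at h
  rcases Option.bind_eq_some_iff.mp h with ⟨k, _, hx⟩
  exact List.mem_of_getElem? hx

theorem nospace_of_all (l : List Char) (h : l.all (fun c => !PySem.Chars.isspace c) = true) :
    ∀ c ∈ l, PySem.Chars.isspace c = false := by
  intro c hc
  simpa using (List.all_eq_true.mp h) c hc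

theorem openai_bases_props :
    ∀ p ∈ altOpenai, p.toList ≠ [] ∧ ∀ c ∈ p.toList, PySem.Chars.isspace c = false := by
  intro p hp
  fin_cases hp <;> exact ⟨by decide, nospace_of_all _ (by decide)⟩

theorem pyBases_eq : pyOpenAIBases = altOpenai := by decide

theorem infix_lower_of_mem_alt (m p : String) (hp : p ∈ altOpenai)
    (h : p.toList <:+: (PySem.Str.lower (PySem.Str.strip m)).toList) :
    (altOpenai.any (fun q => PySem.Str.isIn q (PySem.Str.lower m))) = true := by
  rw [List.any_eq_true]
  refine ⟨p, hp, ?_⟩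
  rw [PySem.Str.isIn_iff_infix]
  simp only [PySem.Str.toList_lower, PySem.Str.toList_strip] at h ⊢
  rw [lower_strip_comm] at h
  exact h.trans (strip_infix _)

theorem isIn_strip_lower (m p : String) (hp : p ∈ altOpenai) :
    PySem.Str.isIn p (PySem.Str.lower (PySem.Str.strip m))
      = PySem.Str.isIn p (PySem.Str.lower m) := by
  obtain ⟨hne, hb⟩ := openai_bases_props p hp
  rw [Bool.eq_iff_iff, PySem.Str.isIn_iff_infix, PySem.Str.isIn_iff_infix]
  simp only [PySem.Str.toList_lower, PySem.Str.toList_strip]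
  rw [lower_strip_comm]
  exact infix_strip_iff _ _ hne hb

theorem openai_eq (m : String) :
    is_openai_embedding_model m
      = altOpenai.any (fun p => PySem.Str.isIn p (PySem.Str.lower m)) := by
  by_cases hm : (m == "") = true
  · have hm' : m = "" := eq_of_beq hm
    subst hm'
    decide
  · unfold is_openai_embedding_model
    rw [if_neg hm]
    dsimp only
    by_cases h1 : PySem.Set.contains pyOpenAIBases
        (PySem.Str.lower (PySem.Str.strip m)) = true
    · rw [if_pos h1]
      symm
      rw [pyBases_eq] at h1
      have hmem : PySem.Str.lower (PySem.Str.strip m) ∈ altOpenai :=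
        (PySem.Set.contains_iff _ _).mp h1
      exact infix_lower_of_mem_alt m _ hmem (List.infix_refl _)
    · rw [if_neg h1]
      by_cases h2 : (["/", ":"] : List String).any
          (pySepCandidateHit (PySem.Str.lower (PySem.Str.strip m))) = true
      · rw [if_pos h2]
        symm
        rw [List.any_eq_true] at h2
        obtain ⟨sep, hsep, hf⟩ := h2
        unfold pySepCandidateHit at hf
        have hsepne : sep.toList.isEmpty = false := by
          rcases List.mem_cons.mp hsep with h | h
          · subst h; decide
          · rcases List.mem_cons.mp h with h | h
            · subst h; decide
            · simp at h
        by_cases hin : PySem.Str.isIn sep (PySem.Str.lower (PySem.Str.strip m)) = true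
        · rw [if_pos hin] at hf
          have hsplit : PySem.Str.split? (PySem.Str.lower (PySem.Str.strip m)) sep
              = some (List.map String.ofList
                  (PySem.Chars.splitOn (PySem.Str.lower (PySem.Str.strip m)).toList sep.toList)) := by
            simp [PySem.Str.split?, PySem.Chars.split?, hsepne]
          rw [hsplit] at hf
          dsimp only at hf
          rcases hget : PySem.List.pyGet? (List.map String.ofList
              (PySem.Chars.splitOn (PySem.Str.lower (PySem.Str.strip m)).toList sep.toList)) (-1)
            with _ | cand
          · rw [hget] at hf
            dsimp only at hf
            exact absurd hf (by simp)
          · rw [hget] at hf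
            dsimp only at hf
            have hmem : cand ∈ altOpenai := by
              rw [pyBases_eq] at hf
              exact (PySem.Set.contains_iff _ _).mp hf
            obtain ⟨y, hy, hcand⟩ := List.mem_map.mp (pyGet?_mem _ _ _ hget)
            have hyin : y <:+: (PySem.Str.lower (PySem.Str.strip m)).toList :=
              mem_splitOn_infix _ _ _ hy
            have hct : cand.toList = y := by rw [← hcand, String.toList_ofList]
            exact infix_lower_of_mem_alt m cand hmem (by rw [hct]; exact hyin)
        · rw [if_neg hin] at hf
          exact absurd hf (by simp)
      · rw [if_neg h2]
        simp only [pyBases_eq, altOpenai, List.any_cons, List.any_nil]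
        rw [isIn_strip_lower m _ (by simp [altOpenai]), isIn_strip_lower m _ (by simp [altOpenai]),
          isIn_strip_lower m _ (by simp [altOpenai])]

theorem google_eq (m : String) (hm : ¬ (m == "") = true) :
    is_google_embedding_model m
      = altGoogle.any (fun p => PySem.Str.isIn p (PySem.Str.lower m)) := by
  unfold is_google_embedding_model
  rw [if_neg hm]
  rfl

theorem getD_altPatterns (k : String) :
    PySem.Dict.getD altProviderPatterns k altOpenai =
      if k = "openai" then altOpenai
      else if k = "google" then altGoogle
      else if k = "openrouter" ∨ k = "anthropic" ∨ k = "grok" then altOpenai ++ altGoogle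
      else if k = "ollama" then altOllama
      else altOpenai := by
  by_cases h1 : k = "openai"
  · subst h1; decide
  by_cases h2 : k = "google"
  · subst h2; decide
  by_cases h3 : k = "openrouter"
  · subst h3; decide
  by_cases h4 : k = "anthropic"
  · subst h4; decide
  by_cases h5 : k = "grok"
  · subst h5; decide
  by_cases h6 : k = "ollama"
  · subst h6; decide
  rw [if_neg h1, if_neg h2, if_neg (by tauto), if_neg h6]
  have hfind : List.find? (fun p => p.1 == k) altProviderPatterns.items = none := by
    rw [List.find?_eq_none]
    intro x hx
    have : altProviderPatterns.items = [("openai", altOpenai), ("google", altGoogle),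
        ("openrouter", altOpenai ++ altGoogle), ("anthropic", altOpenai ++ altGoogle),
        ("grok", altOpenai ++ altGoogle), ("ollama", altOllama)] := by rfl
    rw [this] at hx
    simp only [List.mem_cons, List.not_mem_nil, or_false] at hx
    rcases hx with rfl | rfl | rfl | rfl | rfl | rfl
    · exact fun hq => h1 ((eq_of_beq hq).symm)
    · exact fun hq => h2 ((eq_of_beq hq).symm)
    · exact fun hq => h3 ((eq_of_beq hq).symm)
    · exact fun hq => h4 ((eq_of_beq hq).symm)
    · exact fun hq => h5 ((eq_of_beq hq).symm)
    · exact fun hq => h6 ((eq_of_beq hq).symm)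
  unfold PySem.Dict.getD PySem.Dict.get?
  rw [hfind]
  rfl

-- ===== VERDICT (by name: the statement is the Claim_ definition above) =====
theorem contains3 (pl : String)
    (h : (["openrouter", "anthropic", "grok"] : List String).contains pl = true) :
    pl = "openrouter" ∨ pl = "anthropic" ∨ pl = "grok" := by
  have := List.contains_iff_mem.mp h
  simpa using this

theorem is_valid_embedding_model_for_provider_spec : Claim_equal_is_valid_embedding_model_for_provider := by
  intro model provider _
  unfold Spec_is_valid_embedding_model_for_provider
  unfold is_valid_embedding_model_for_provider is_valid_embedding_model_for_provider_alt
  by_cases hg : (model == "" || provider == "") = true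
  · rw [if_pos hg, if_pos hg]
  · have hm : ¬ (model == "") = true := by
      intro h
      exact hg (by simp [h])
    rw [if_neg hg, if_neg hg]
    dsimp only
    rw [getD_altPatterns]
    by_cases h1 : (PySem.Str.lower provider == "openai") = true
    · rw [if_pos h1, if_pos (eq_of_beq h1)]
      exact openai_eq model
    · rw [if_neg h1, if_neg (fun h => h1 (beq_iff_eq.mpr h))]
      by_cases h2 : (PySem.Str.lower provider == "google") = true
      · rw [if_pos h2, if_pos (eq_of_beq h2)]
        exact google_eq model hm
      · rw [if_neg h2, if_neg (fun h => h2 (beq_iff_eq.mpr h))]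
        by_cases h3 : (["openrouter", "anthropic", "grok"] : List String).contains
            (PySem.Str.lower provider) = true
        · rw [if_pos h3, if_pos (contains3 _ h3)]
          rw [List.any_append, openai_eq, google_eq model hm]
        · have h3' : ¬ (PySem.Str.lower provider = "openrouter" ∨
              PySem.Str.lower provider = "anthropic" ∨ PySem.Str.lower provider = "grok") := by
            intro h
            exact h3 (List.contains_iff_mem.mpr (by rcases h with h | h | h <;> simp [h]))
          rw [if_neg h3, if_neg h3']
          by_cases h4 : (PySem.Str.lower provider == "ollama") = true
          · rw [if_pos h4, if_pos (eq_of_beq h4)]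
            rfl
          · rw [if_neg h4, if_neg (fun h => h4 (beq_iff_eq.mpr h))]
            exact openai_eq model
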